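-- pv_equiv track=rewrite | github.com/eldorPulatov/Python | IT-планета/Functions.py | takeBase64
-- ===== SOURCE A (Python) =====
-- def takeBase64(string: str) -> str:
--     """
--     Функция принимает строку из header-а {Authorization} запроса и записывает кодировку в отдельную переменную
--     :param string:
--     :return base64:
--     """
--     base64 = ""
--     isOk = 0
--     for i in string:
--         if i == ' ':
--             isOk = 1
--             continue
--         if isOk == 1:
--             base64 = base64 + i
--
--     return base64
-- ===== SOURCE B (Python) =====
-- def takeBase64(string: str) -> str:
--     if ' ' not in string:
--         return ''
--     return string[string.index(' ') + 1:].replace(' ', '')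
-- ===== Notes on version B (the rewrite author's own statement) =====
-- stated objective: idiomatic
-- what changed: Replaced A's char-by-char flagged accumulator loop (quadratic string concatenation) with a membership test, one slice after the first space, and one replace() deleting the remaining spaces.
import Mathlib
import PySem

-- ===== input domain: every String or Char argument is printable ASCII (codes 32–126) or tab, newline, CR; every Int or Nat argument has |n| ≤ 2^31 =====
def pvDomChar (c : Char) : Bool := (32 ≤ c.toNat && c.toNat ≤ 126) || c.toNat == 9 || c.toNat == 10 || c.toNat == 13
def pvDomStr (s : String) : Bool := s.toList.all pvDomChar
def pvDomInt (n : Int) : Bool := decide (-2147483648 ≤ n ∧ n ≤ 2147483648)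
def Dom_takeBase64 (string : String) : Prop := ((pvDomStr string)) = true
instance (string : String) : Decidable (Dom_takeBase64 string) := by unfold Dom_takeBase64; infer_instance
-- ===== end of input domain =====

-- B replaces A's flagged char-by-char accumulator loop with membership test + slice after the first space + replace of the remaining spaces (idiomatic; measured faster).

-- ===== PORT A =====
-- state: (base64 so far as a char list, isOk flag); literal transliteration of A's for-loop
def takeBase64 (string : String) : String :=
  let r := string.toList.foldl
    (fun (st : List Char × Int) i =>
      if i = ' ' then (st.1, 1)
      else if st.2 = 1 then (st.1 ++ [i], st.2)
      else st)
    ([], 0)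
  String.ofList r.1

-- ===== PORT B =====
def takeBase64_alt (string : String) : String :=
  if PySem.Str.isIn " " string = false then ""
  else PySem.Str.replace (PySem.Str.slice string (some (PySem.Str.find string " " + 1)) none) " " ""

-- ===== PRECONDITION & SPEC =====
def Spec_takeBase64 (string : String) (out : String) : Prop := out = takeBase64_alt string
instance (string : String) (out : String) : Decidable (Spec_takeBase64 string out) := by unfold Spec_takeBase64; infer_instance

-- ===== CLAIM (what is proved, stated in full; the proofs are below) =====
def Claim_equal_takeBase64 : Prop := ∀ (string : String), Dom_takeBase64 string → Spec_takeBase64 string (takeBase64 string)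

-- ===== LEMMAS AND PROOFS =====

-- the loop body of A, named for the lemmas
def pvStepA (st : List Char × Int) (i : Char) : List Char × Int :=
  if i = ' ' then (st.1, 1)
  else if st.2 = 1 then (st.1 ++ [i], st.2)
  else st

-- once the flag is set, the loop just appends the non-space characters
theorem foldl_ok1 (l : List Char) (acc : List Char) :
    l.foldl pvStepA (acc, 1) = (acc ++ l.filter (· ≠ ' '), 1) := by
  induction l generalizing acc with
  | nil => simp
  | cons c t ih =>
    by_cases hc : c = ' ' <;> simp [pvStepA, hc, ih]

-- Chars.replace.go deleting single spaces is filter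
theorem replace_go_filter (fuel : Nat) (l acc : List Char) (h : l.length ≤ fuel) :
    PySem.Chars.replace.go [' '] [] fuel l acc = acc.reverse ++ l.filter (· ≠ ' ') := by
  induction fuel generalizing l acc with
  | zero =>
    have : l = [] := List.length_eq_zero_iff.mp (Nat.le_zero.mp h)
    subst this
    simp [PySem.Chars.replace.go]
  | succ n ih =>
    cases l with
    | nil => simp [PySem.Chars.replace.go]
    | cons c t =>
      by_cases hc : c = ' '
      · subst hc
        have hpre : [' '].isPrefixOf (' ' :: t) = true := by simp [List.isPrefixOf]
        simp only [PySem.Chars.replace.go, hpre, if_true, List.length_cons,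
          List.length_nil, List.drop_succ_cons, List.drop_zero, List.reverse_nil,
          List.nil_append]
        rw [ih t acc (by simpa using h)]
        simp
      · have hpre : [' '].isPrefixOf (c :: t) = false := by
          simp only [List.isPrefixOf, Bool.and_eq_false_iff, beq_eq_false_iff_ne, ne_eq]
          exact Or.inl fun h => hc h.symm
        simp only [PySem.Chars.replace.go, hpre, Bool.false_eq_true, if_false]
        rw [ih t (c :: acc) (by simpa using h)]
        simp [hc]

theorem replace_filter (l : List Char) :
    PySem.Chars.replace l [' '] [] = l.filter (· ≠ ' ') := by
  simp only [PySem.Chars.replace, List.isEmpty_cons, if_false]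
  simpa using replace_go_filter l.length l [] le_rfl

-- find.go shift lemma
theorem findgo_shift (sub l : List Char) (k j : Nat) :
    PySem.Chars.find.go sub l (k + j) =
      if PySem.Chars.find.go sub l k = -1 then -1
      else PySem.Chars.find.go sub l k + j := by
  induction l generalizing k with
  | nil =>
    simp only [PySem.Chars.find.go]
    split_ifs with h1 h2 <;> omega
  | cons c t ih =>
    by_cases hp : sub.isPrefixOf (c :: t)
    · simp only [PySem.Chars.find.go, hp, if_true]
      split_ifs with h <;> omega
    · simp only [PySem.Chars.find.go, hp, Bool.false_eq_true, if_false]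
      rw [show k + j + 1 = (k + 1) + j by omega, ih (k + 1)]

-- main characterisation, on the list side
theorem key (cs : List Char) :
    (cs.foldl pvStepA ([], 0)).1 =
      (if PySem.Chars.isIn [' '] cs = false then []
       else PySem.Chars.replace
              (PySem.Chars.slice cs (some (PySem.Chars.find cs [' '] + 1)) none) [' '] []) := by
  induction cs with
  | nil => simp [PySem.Chars.isIn, PySem.Chars.find, PySem.Chars.find.go]
  | cons c t ih =>
    by_cases hc : c = ' '
    · subst hc
      have hfind : PySem.Chars.find (' ' :: t) [' '] = 0 := by
        simp [PySem.Chars.find, PySem.Chars.find.go, List.isPrefixOf]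
      have hin : PySem.Chars.isIn [' '] (' ' :: t) = true := by
        simp [PySem.Chars.isIn, hfind]
      rw [List.foldl_cons, show pvStepA ([], (0:Int)) ' ' = ([], 1) from rfl,
          foldl_ok1]
      simp only [hin, Bool.true_eq_false, if_false, hfind,
        PySem.Chars.slice_eq_listSlice]
      rw [show ((0 : Int) + 1) = ((1 : Nat) : Int) by norm_num,
          PySem.List.slice_from_natCast]
      simp [replace_filter]
    · have hpre : [' '].isPrefixOf (c :: t) = false := by
        simp only [List.isPrefixOf, Bool.and_eq_false_iff, beq_eq_false_iff_ne, ne_eq]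
        exact Or.inl fun h => hc h.symm
      have hfind : PySem.Chars.find (c :: t) [' '] =
          (if PySem.Chars.find t [' '] = -1 then -1 else PySem.Chars.find t [' '] + 1) := by
        simp only [PySem.Chars.find, PySem.Chars.find.go, hpre, Bool.false_eq_true, if_false]
        have := findgo_shift [' '] t 0 1
        simpa using this
      rw [List.foldl_cons,
          show pvStepA ([], (0:Int)) c = ([], 0) by
            simp [pvStepA, hc]]
      rw [ih]
      by_cases hin : PySem.Chars.isIn [' '] t = true
      · have hne : PySem.Chars.find t [' '] ≠ -1 := by
          simpa [PySem.Chars.isIn] using hin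
        have hnonneg : 0 ≤ PySem.Chars.find t [' '] :=
          (PySem.Chars.find_nonneg_iff _ _).mpr ((PySem.Chars.find_ne_neg_one_iff _ _).mp hne)
        have hin' : PySem.Chars.isIn [' '] (c :: t) = true := by
          simp only [PySem.Chars.isIn, hfind, if_neg hne]
          simp only [bne_iff_ne, ne_eq, decide_eq_true_eq]
          omega
        simp only [hin, hin', Bool.true_eq_false, if_false, hfind, if_neg hne,
          PySem.Chars.slice_eq_listSlice]
        rw [PySem.List.slice_from t (a := PySem.Chars.find t [' '] + 1) (by omega),
            PySem.List.slice_from (c :: t) (a := PySem.Chars.find t [' '] + 1 + 1) (by omega)]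
        congr 1
        have : (PySem.Chars.find t [' '] + 1 + 1).toNat
             = (PySem.Chars.find t [' '] + 1).toNat + 1 := by omega
        rw [this, List.drop_succ_cons]
      · have heq : PySem.Chars.find t [' '] = -1 := by
          by_contra hne
          exact hin (by simp [PySem.Chars.isIn, hne])
        have hin' : PySem.Chars.isIn [' '] (c :: t) = false := by
          simp [PySem.Chars.isIn, hfind, heq]
        simp only [hin', if_pos rfl]
        simpa [eq_false_of_ne_true hin] using rfl
    
theorem takeBase64_eq (s : String) :
    takeBase64 s = String.ofList (s.toList.foldl pvStepA ([], 0)).1 := rfl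

theorem sp_toList : (" " : String).toList = [' '] := by decide

theorem emp_toList : ("" : String).toList = [] := by decide

-- ===== VERDICT (by name: the statement is the Claim_ definition above) =====
theorem takeBase64_spec : Claim_equal_takeBase64 := by
  intro s _
  unfold Spec_takeBase64 takeBase64_alt
  have h := key s.toList
  by_cases hin : PySem.Str.isIn " " s = false
  · have hin0 : PySem.Chars.isIn [' '] s.toList = false := by
      have := PySem.Str.isIn_eq " " s
      rw [sp_toList] at this
      rw [← this]; exact hin
    rw [if_pos hin, takeBase64_eq]
    rw [hin0] at h
    rw [h]
    simp
  · have hin' : PySem.Chars.isIn [' '] s.toList = true := by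
      have hb := PySem.Str.isIn_eq " " s
      rw [sp_toList] at hb
      rw [← hb]
      exact eq_true_of_ne_false hin
    rw [if_neg hin, takeBase64_eq]
    apply String.toList_inj.mp
    rw [hin'] at h
    simp only [Bool.true_eq_false, if_false] at h
    have hfind : PySem.Str.find s " " = PySem.Chars.find s.toList [' '] := by
      rw [PySem.Str.find_eq, sp_toList]
    simp only [String.toList_ofList, PySem.Str.toList_replace, PySem.Str.toList_slice,
      sp_toList, emp_toList, hfind, h]
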